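-- pv_equiv track=rewrite | github.com/rajesh1226/fastestimator | fastestimator/dataset/coco.py | format_bb
-- ===== SOURCE A (Python) =====
-- def format_bb(item):
--     x1s = []
--     y1s = []
--     x2s = []
--     y2s = []
--     for bb in item:
--         if bb[2] < 1 or bb[2] < 1:
--             continue
--         else:
--             x1s.append(bb[0])
--             y1s.append(bb[1])
--             x2s.append(bb[0]+bb[2])
--             y2s.append(bb[1]+bb[3])
--     return [x1s, y1s, x2s, y2s]
-- ===== SOURCE B (Python) =====
-- def format_bb(item):
--     n = len(item)
--     if n == 0:
--         return [[], [], [], []]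
--     if n == 1:
--         bb = item[0]
--         if bb[2] < 1:
--             return [[], [], [], []]
--         return [[bb[0]], [bb[1]], [bb[0] + bb[2]], [bb[1] + bb[3]]]
--     mid = n // 2
--     left = format_bb(item[:mid])
--     right = format_bb(item[mid:])
--     return [left[i] + right[i] for i in range(4)]
-- ===== Notes on version B (the rewrite author's own statement) =====
-- stated objective: alternative
-- what changed: B computes the four coordinate lists by divide-and-conquer: it splits the box list in half, recurses on each half, and concatenates the two results column-wise, instead of A's single left-to-right scan appending into four accumulator lists.
import Mathlib
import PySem

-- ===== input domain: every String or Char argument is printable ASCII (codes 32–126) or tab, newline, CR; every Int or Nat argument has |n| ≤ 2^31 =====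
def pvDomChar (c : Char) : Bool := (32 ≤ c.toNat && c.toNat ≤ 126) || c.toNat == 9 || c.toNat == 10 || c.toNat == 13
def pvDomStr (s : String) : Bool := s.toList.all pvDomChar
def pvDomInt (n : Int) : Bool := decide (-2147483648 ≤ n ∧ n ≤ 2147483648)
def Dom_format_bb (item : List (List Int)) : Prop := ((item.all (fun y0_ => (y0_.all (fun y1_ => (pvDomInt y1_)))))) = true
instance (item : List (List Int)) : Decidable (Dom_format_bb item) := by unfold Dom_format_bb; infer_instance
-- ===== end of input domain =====

-- B replaces A's single accumulating scan by divide-and-conquer: split the list in half,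
-- recurse, and concatenate the two results column-wise (objective: alternative algorithm).

-- ===== PORT A =====
-- one step of A's loop over the four accumulator lists
def format_bb_step (acc : List Int × List Int × List Int × List Int) (bb : List Int) :
    List Int × List Int × List Int × List Int :=
  if PySem.List.pyGetD bb 2 0 < 1 ∨ PySem.List.pyGetD bb 2 0 < 1 then acc
  else (acc.1 ++ [PySem.List.pyGetD bb 0 0],
        acc.2.1 ++ [PySem.List.pyGetD bb 1 0],
        acc.2.2.1 ++ [PySem.List.pyGetD bb 0 0 + PySem.List.pyGetD bb 2 0],
        acc.2.2.2 ++ [PySem.List.pyGetD bb 1 0 + PySem.List.pyGetD bb 3 0])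

def format_bb (item : List (List Int)) : List (List Int) :=
  let s := item.foldl format_bb_step ([], [], [], [])
  [s.1, s.2.1, s.2.2.1, s.2.2.2]

-- ===== PORT B =====
-- item[:mid] / item[mid:] with 0 ≤ mid ≤ len are exactly List.take / List.drop
def format_bb_alt (item : List (List Int)) : List (List Int) :=
  if item.length = 0 then [[], [], [], []]
  else if item.length = 1 then
    let bb := PySem.List.pyGetD item 0 []
    if PySem.List.pyGetD bb 2 0 < 1 then [[], [], [], []]
    else [[PySem.List.pyGetD bb 0 0], [PySem.List.pyGetD bb 1 0],
          [PySem.List.pyGetD bb 0 0 + PySem.List.pyGetD bb 2 0],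
          [PySem.List.pyGetD bb 1 0 + PySem.List.pyGetD bb 3 0]]
  else
    let mid := item.length / 2
    let left := format_bb_alt (item.take mid)
    let right := format_bb_alt (item.drop mid)
    (List.range 4).map (fun i => PySem.List.pyGetD left i [] ++ PySem.List.pyGetD right i [])
termination_by item.length
decreasing_by
  · simp; omega
  · simp; omega

-- ===== PRECONDITION & SPEC =====
-- Pre_ excludes exactly the inputs where Python A raises IndexError: a row shorter than 3
-- (bb[2] fails), or a kept row (bb[2] >= 1) shorter than 4 (bb[3] fails).
def Pre_format_bb (item : List (List Int)) : Prop :=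
  ∀ bb ∈ item, 3 ≤ bb.length ∧ (1 ≤ PySem.List.pyGetD bb 2 0 → 4 ≤ bb.length)
instance (item : List (List Int)) : Decidable (Pre_format_bb item) := by unfold Pre_format_bb; infer_instance

def pvWitness_format_bb : List (List Int) := [[1, 2, 3, 4], [0, 0, 0], [5, 5, 2, 2]]

def Spec_format_bb (item : List (List Int)) (out : List (List Int)) : Prop := out = format_bb_alt item
instance (item : List (List Int)) (out : List (List Int)) : Decidable (Spec_format_bb item out) := by unfold Spec_format_bb; infer_instance

-- ===== CLAIM =====
def Claim_equal_format_bb : Prop := ∀ (item : List (List Int)), Dom_format_bb item → Pre_format_bb item → Spec_format_bb item (format_bb item)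

-- ===== LEMMAS AND PROOFS =====

-- the four coordinate columns, as filter-then-project lists (the common characterisation)
def pvCols (item : List (List Int)) : List (List Int) :=
  let rows := item.filter (fun bb => 1 ≤ PySem.List.pyGetD bb 2 0)
  [rows.map (fun bb => PySem.List.pyGetD bb 0 0),
   rows.map (fun bb => PySem.List.pyGetD bb 1 0),
   rows.map (fun bb => PySem.List.pyGetD bb 0 0 + PySem.List.pyGetD bb 2 0),
   rows.map (fun bb => PySem.List.pyGetD bb 1 0 + PySem.List.pyGetD bb 3 0)]

lemma format_bb_fold_eq (item : List (List Int)) :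
    ∀ a b c d : List Int,
      item.foldl format_bb_step (a, b, c, d) =
        (a ++ (pvCols item)[0]!, b ++ (pvCols item)[1]!,
         c ++ (pvCols item)[2]!, d ++ (pvCols item)[3]!) := by
  induction item with
  | nil => simp [pvCols]
  | cons bb rest ih =>
    intro a b c d
    by_cases h : 1 ≤ PySem.List.pyGetD bb 2 0
    · have hlt : ¬ PySem.List.pyGetD bb 2 0 < 1 := by omega
      simp [pvCols, format_bb_step, h, hlt, List.foldl_cons, ih]
    · have hlt : PySem.List.pyGetD bb 2 0 < 1 := by omega
      simp [pvCols, format_bb_step, h, hlt, List.foldl_cons, ih]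

lemma format_bb_eq_cols (item : List (List Int)) : format_bb item = pvCols item := by
  unfold format_bb
  rw [format_bb_fold_eq]
  simp [pvCols]

lemma pvCols_append (xs ys : List (List Int)) :
    pvCols (xs ++ ys) = (List.range 4).map
      (fun i => PySem.List.pyGetD (pvCols xs) i [] ++ PySem.List.pyGetD (pvCols ys) i []) := by
  simp [pvCols, List.filter_append, List.range_succ, PySem.List.pyGetD]

lemma format_bb_alt_eq_cols (item : List (List Int)) : format_bb_alt item = pvCols item := by
  induction hn : item.length using Nat.strong_induction_on generalizing item with
  | _ n ih =>
    unfold format_bb_alt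
    by_cases h0 : item.length = 0
    · simp [List.length_eq_zero_iff.mp h0, pvCols]
    · by_cases h1 : item.length = 1
      · obtain ⟨bb, rfl⟩ : ∃ bb, item = [bb] := by
          match item, h1 with | [bb], _ => exact ⟨bb, rfl⟩
        by_cases hk : PySem.List.pyGetD bb 2 0 < 1
        · have h2 : ¬ 1 ≤ PySem.List.pyGetD bb 2 0 := by omega
          simp [pvCols, PySem.List.pyGetD_zero_cons, hk, h2]
        · have h2 : 1 ≤ PySem.List.pyGetD bb 2 0 := by omega
          simp [pvCols, PySem.List.pyGetD_zero_cons, hk, h2]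
      · simp only [h0, h1, if_false]
        have hl : (item.take (item.length / 2)).length < n := by simp; omega
        have hr : (item.drop (item.length / 2)).length < n := by simp; omega
        rw [ih _ hl _ rfl, ih _ hr _ rfl]
        conv_rhs => rw [← List.take_append_drop (item.length / 2) item]
        rw [pvCols_append]

-- ===== VERDICT =====
theorem format_bb_spec : Claim_equal_format_bb := by
  intro item _ _
  show format_bb item = format_bb_alt item
  rw [format_bb_eq_cols, format_bb_alt_eq_cols]
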